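-- pv_equiv track=rewrite | github.com/laycrojj/aoc23 | python/3/solution_3_2.py | get_numbers_in_line
-- ===== SOURCE A (Python) =====
-- NUMBERS: list = [ str(x) for x in range(10) ]
--
-- def get_number_length(line_portion: list) -> int:
--     """ Get the Length of the current number in the line """
--
--     number_length = 1
--
--     for character in line_portion:
--         if character in NUMBERS:
--             number_length += 1
--         else:
--             return number_length
--
--     return number_length
--
-- def get_numbers_in_line(line: str, line_index: int) -> list:
--     """ Return a List of Tuples containing the start index
--     and length of the number on the line """
--
--     line_numbers: list = []
--
--     number_end = 0
--
--     for index, character in enumerate(line):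
--         if index >= number_end and character in NUMBERS:
--             start = index
--             length = get_number_length(line[index + 1::])
--             line_numbers.append((start,length,line_index))
--             number_end = index + length
--
--     return line_numbers
-- ===== SOURCE B (Python) =====
-- def get_numbers_in_line(line: str, line_index: int) -> list:
--     """Single-pass run-length scan: track the start of the current digit run,
--     emit (start, length, line_index) when the run ends."""
--     line_numbers = []
--     start = None
--     for i, ch in enumerate(line):
--         if '0' <= ch <= '9':
--             if start is None:
--                 start = i
--         elif start is not None:
--             line_numbers.append((start, i - start, line_index))
--             start = None
--     if start is not None:
--         line_numbers.append((start, len(line) - start, line_index))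
--     return line_numbers
-- ===== Notes on version B (the rewrite author's own statement) =====
-- stated objective: simpler
-- what changed: Replaced the outer loop with an inner forward-scan helper and a number_end skip cursor by a single-pass state machine that tracks the start of the current digit run and emits (start, length, line_index) when the run ends.
import Mathlib
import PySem

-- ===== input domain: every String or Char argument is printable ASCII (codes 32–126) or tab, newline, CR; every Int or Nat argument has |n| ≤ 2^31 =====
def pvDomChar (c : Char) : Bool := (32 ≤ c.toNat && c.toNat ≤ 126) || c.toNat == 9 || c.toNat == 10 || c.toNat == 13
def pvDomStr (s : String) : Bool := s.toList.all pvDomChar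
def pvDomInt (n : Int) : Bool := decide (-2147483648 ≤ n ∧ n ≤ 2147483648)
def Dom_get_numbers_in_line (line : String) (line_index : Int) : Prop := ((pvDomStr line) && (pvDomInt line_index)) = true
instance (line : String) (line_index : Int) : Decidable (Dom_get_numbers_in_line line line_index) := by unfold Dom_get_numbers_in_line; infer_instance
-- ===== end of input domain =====

-- B changes the algorithm: one single-pass state machine (run-start tracking) instead of
-- A's outer loop + forward-scan helper + skip cursor; objective: simpler.

-- ===== PORT A =====
-- NUMBERS = [str(x) for x in range(10)]; membership of a 1-char string = this char list
def NUMBERS : List Char := ['0','1','2','3','4','5','6','7','8','9']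

-- get_number_length: number_length starts at 1, +1 per leading digit, return at first non-digit
def get_number_length_go : List Char → Int → Int
  | [], acc => acc
  | c :: rest, acc => if NUMBERS.contains c then get_number_length_go rest (acc + 1) else acc

def get_number_length (line_portion : List Char) : Int :=
  get_number_length_go line_portion 1

-- the enumerate loop of A, as recursion over the remaining characters;
-- idx is the enumerate index, number_end the skip cursor; line[index+1:] is `rest`
def gnilA_loop (li : Int) : List Char → Int → Int → List (Int × Int × Int)
  | [], _, _ => []
  | c :: rest, idx, number_end =>
    if idx ≥ number_end ∧ NUMBERS.contains c then
      let length := get_number_length rest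
      (idx, length, li) :: gnilA_loop li rest (idx + 1) (idx + length)
    else
      gnilA_loop li rest (idx + 1) number_end

def get_numbers_in_line (line : String) (line_index : Int) : List (Int × Int × Int) :=
  gnilA_loop line_index line.toList 0 0

-- ===== PORT B =====
-- '0' <= ch <= '9'
def isDig (c : Char) : Bool := decide ('0' ≤ c) && decide (c ≤ '9')

-- B's single pass: i is the current index, start the start of the current digit run (None/Some);
-- at a run's end (non-digit or end of string) emit (start, i - start, line_index)
def gnilB_loop (li : Int) : List Char → Int → Option Int → List (Int × Int × Int)
  | [], _, none => []
  | [], i, some s => [(s, i - s, li)]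
  | c :: rest, i, none =>
    if isDig c then gnilB_loop li rest (i + 1) (some i)
    else gnilB_loop li rest (i + 1) none
  | c :: rest, i, some s =>
    if isDig c then gnilB_loop li rest (i + 1) (some s)
    else (s, i - s, li) :: gnilB_loop li rest (i + 1) none

def get_numbers_in_line_alt (line : String) (line_index : Int) : List (Int × Int × Int) :=
  gnilB_loop line_index line.toList 0 none

-- ===== PRECONDITION & SPEC =====
def Spec_get_numbers_in_line (line : String) (line_index : Int) (out : List (Int × Int × Int)) : Prop := out = get_numbers_in_line_alt line line_index
instance (line : String) (line_index : Int) (out : List (Int × Int × Int)) : Decidable (Spec_get_numbers_in_line line line_index out) := by unfold Spec_get_numbers_in_line; infer_instance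

-- ===== CLAIM (what is proved, stated in full; the proofs are below) =====
def Claim_equal_get_numbers_in_line : Prop := ∀ (line : String) (line_index : Int), Dom_get_numbers_in_line line line_index → Spec_get_numbers_in_line line line_index (get_numbers_in_line line line_index)

-- ===== LEMMAS AND PROOFS =====

-- the two digit tests agree
-- Char equality reads off toNat (used to bridge the two digit tests)
lemma char_eq_iff_toNat (c d : Char) : c = d ↔ c.toNat = d.toNat :=
  ⟨fun h => h ▸ rfl, fun h => Char.ext (UInt32.toNat_inj.mp h)⟩

-- the two digit tests agree
lemma contains_NUMBERS_eq_isDig (c : Char) : NUMBERS.contains c = isDig c := by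
  apply Bool.eq_iff_iff.mpr
  simp only [NUMBERS, isDig, List.contains_eq_mem, decide_eq_true_eq, List.mem_cons,
    List.not_mem_nil, or_false, Bool.and_eq_true, decide_eq_true_eq]
  rw [char_eq_iff_toNat c '0', char_eq_iff_toNat c '1', char_eq_iff_toNat c '2',
    char_eq_iff_toNat c '3', char_eq_iff_toNat c '4', char_eq_iff_toNat c '5',
    char_eq_iff_toNat c '6', char_eq_iff_toNat c '7', char_eq_iff_toNat c '8',
    char_eq_iff_toNat c '9']
  simp only [show ('0').toNat = 48 from rfl, show ('1').toNat = 49 from rfl,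
    show ('2').toNat = 50 from rfl, show ('3').toNat = 51 from rfl,
    show ('4').toNat = 52 from rfl, show ('5').toNat = 53 from rfl,
    show ('6').toNat = 54 from rfl, show ('7').toNat = 55 from rfl,
    show ('8').toNat = 56 from rfl, show ('9').toNat = 57 from rfl]
  constructor
  · intro h
    constructor
    · show ((48 : UInt32) ≤ c.val)
      have : 48 ≤ c.toNat := by omega
      exact UInt32.le_iff_toNat_le.mpr this
    · show (c.val ≤ (57 : UInt32))
      have : c.toNat ≤ 57 := by omega
      exact UInt32.le_iff_toNat_le.mpr this
  · rintro ⟨h1, h2⟩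
    have hv1 : 48 ≤ c.toNat := h1
    have hv2 : c.toNat ≤ 57 := h2
    omega

-- number of leading digits of a suffix
def leadDigits (cs : List Char) : Nat := (cs.takeWhile isDig).length

lemma get_number_length_go_shift (cs : List Char) (a b : Int) :
    get_number_length_go cs (a + b) = get_number_length_go cs a + b := by
  induction cs generalizing a with
  | nil => rfl
  | cons c rest ih =>
    simp only [get_number_length_go]
    split
    · rw [show a + b + 1 = (a + 1) + b by ring, ih]
    · rfl

lemma get_number_length_eq (cs : List Char) :
    get_number_length cs = 1 + (leadDigits cs : Int) := by
  unfold get_number_length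
  induction cs with
  | nil => simp [get_number_length_go, leadDigits]
  | cons c rest ih =>
    simp only [get_number_length_go, leadDigits, List.takeWhile, contains_NUMBERS_eq_isDig]
    cases h : isDig c with
    | false => simp
    | true =>
      simp only [if_true, List.length_cons]
      rw [show (1 : Int) + 1 = 1 + 1 from rfl, get_number_length_go_shift rest 1 1, ih]
      push_cast [leadDigits]
      ring

-- the mutual invariant: P cs = (A with idle cursor = B with no open run),
-- Q cs = (B with an open run emits the pending tuple then rejoins A skipping to the run's end)
lemma gnil_invariant (li : Int) (cs : List Char) :
    (∀ i ne : Int, ne ≤ i → gnilA_loop li cs i ne = gnilB_loop li cs i none) ∧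
    (∀ i s : Int, ∀ ne : Int, ne = i + (leadDigits cs : Int) →
      gnilB_loop li cs i (some s) = (s, ne - s, li) :: gnilA_loop li cs i ne) := by
  induction cs with
  | nil =>
    refine ⟨fun i ne _ => rfl, fun i s ne hne => ?_⟩
    simp [gnilB_loop, gnilA_loop, hne, leadDigits]
  | cons c rest ih =>
    obtain ⟨ihP, ihQ⟩ := ih
    constructor
    · intro i ne hle
      simp only [gnilA_loop, gnilB_loop, contains_NUMBERS_eq_isDig]
      cases h : isDig c with
      | false =>
        rw [if_neg (by simp), if_neg (by simp)]
        exact ihP (i + 1) ne (by omega)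
      | true =>
        rw [if_pos ⟨hle, rfl⟩, if_pos rfl]
        rw [ihQ (i + 1) i (i + get_number_length rest) (by rw [get_number_length_eq]; ring)]
        congr 1
        rw [show i + get_number_length rest - i = get_number_length rest by ring]
    · intro i s ne hne
      simp only [gnilB_loop, gnilA_loop, contains_NUMBERS_eq_isDig]
      cases h : isDig c with
      | false =>
        have hld : leadDigits (c :: rest) = 0 := by simp [leadDigits, List.takeWhile, h]
        have hni : ne = i := by rw [hld] at hne; push_cast at hne; omega
        subst hni
        rw [if_neg (by simp), if_neg (by simp), ihP (ne + 1) ne (by omega)]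
      | true =>
        have hld : leadDigits (c :: rest) = leadDigits rest + 1 := by
          simp [leadDigits, List.takeWhile, h]
        have hne' : ne = (i + 1) + (leadDigits rest : Int) := by rw [hne, hld]; push_cast; ring
        have hskip : ¬ (i ≥ ne ∧ (true : Bool) = true) := by
          rintro ⟨hge, _⟩
          rw [hne, hld] at hge
          have : (0 : Int) ≤ (leadDigits rest : Int) := Int.natCast_nonneg _
          push_cast at hge
          omega
        rw [if_pos rfl, if_neg hskip]
        exact ihQ (i + 1) s ne hne'

-- ===== VERDICT (by name: the statement is the Claim_ definition above) =====
theorem get_numbers_in_line_spec : Claim_equal_get_numbers_in_line := by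
  intro line line_index _
  unfold Spec_get_numbers_in_line get_numbers_in_line get_numbers_in_line_alt
  exact (gnil_invariant line_index line.toList).1 0 0 le_rfl
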